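-- pv_equiv track=rewrite | github.com/b-mahjour/virtual_flask_campaign | shared/ms_analysis_script4.py | return_mask
-- ===== SOURCE A (Python) =====
-- def return_mask(trace_in):
--     current_mask = 1
--     in_group = False
--     mask = []
--     for ii in trace_in:
--         if ii == 0 and in_group == True:
--             current_mask = current_mask + 1
--             in_group = False
--             mask.append(0)
--         elif ii == 0 and in_group == False:
--             mask.append(0)
--         elif ii > 0 and in_group == True:
--             mask.append(current_mask)
--         elif ii > 0 and in_group == False:
--             in_group = True
--             mask.append(current_mask)
--     return mask
-- ===== SOURCE B (Python) =====
-- def return_mask(trace_in):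
--     # run-based relabeling: filter to kept values, then scan maximal runs
--     vals = [x for x in trace_in if x == 0 or x > 0]
--     out = []
--     counter = 1
--     i = 0
--     n = len(vals)
--     while i < n:
--         j = i
--         if vals[i] > 0:
--             while j < n and vals[j] > 0:
--                 j += 1
--             out.extend([counter] * (j - i))
--             counter += 1
--         else:
--             while j < n and not vals[j] > 0:
--                 j += 1
--             out.extend([0] * (j - i))
--         i = j
--     return out
-- ===== Notes on version B (the rewrite author's own statement) =====
-- stated objective: alternative
-- what changed: Replaces A's per-element state machine (current_mask/in_group flags) with a filter to kept values followed by a run-by-run scan that emits each maximal run's label in one block.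
import Mathlib
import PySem

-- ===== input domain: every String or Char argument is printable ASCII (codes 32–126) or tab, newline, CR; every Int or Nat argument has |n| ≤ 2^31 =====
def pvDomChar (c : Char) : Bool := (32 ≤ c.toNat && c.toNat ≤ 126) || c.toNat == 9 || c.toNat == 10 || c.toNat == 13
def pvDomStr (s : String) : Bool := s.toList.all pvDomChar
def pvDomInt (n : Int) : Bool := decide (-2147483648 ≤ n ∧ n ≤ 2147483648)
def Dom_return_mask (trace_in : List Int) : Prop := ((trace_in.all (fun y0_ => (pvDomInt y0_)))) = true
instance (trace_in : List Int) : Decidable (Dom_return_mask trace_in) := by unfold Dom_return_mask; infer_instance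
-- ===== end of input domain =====

-- B relabels by scanning maximal runs of a pre-filtered list instead of A's per-element state machine (objective: alternative decomposition; return value proved equal).

-- ===== PORT A =====
-- one step of A's loop body: state = (current_mask, in_group, mask)
def stepA (s : Int × Bool × List Int) (ii : Int) : Int × Bool × List Int :=
  if ii == 0 ∧ s.2.1 = true then (s.1 + 1, false, s.2.2 ++ [0])
  else if ii == 0 ∧ s.2.1 = false then (s.1, s.2.1, s.2.2 ++ [0])
  else if ii > 0 ∧ s.2.1 = true then (s.1, s.2.1, s.2.2 ++ [s.1])
  else if ii > 0 ∧ s.2.1 = false then (s.1, true, s.2.2 ++ [s.1])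
  else s

def return_mask (trace_in : List Int) : List Int :=
  (trace_in.foldl stepA (1, false, [])).2.2

-- ===== PORT B =====
-- Source B's filter predicate: x == 0 or x > 0
def keepB (x : Int) : Bool := x == 0 || decide (x > 0)

-- Source B's outer while loop: consume one maximal run per iteration (the inner
-- j-scans are the takeWhile/dropWhile pairs), emitting the run's label.
def emitRuns (l : List Int) (counter : Int) : List Int :=
  match l with
  | [] => []
  | x :: xs =>
    if x > 0 then
      List.replicate ((xs.takeWhile (fun y => decide (y > 0))).length + 1) counter
        ++ emitRuns (xs.dropWhile (fun y => decide (y > 0))) (counter + 1)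
    else
      List.replicate ((xs.takeWhile (fun y => !decide (y > 0))).length + 1) 0
        ++ emitRuns (xs.dropWhile (fun y => !decide (y > 0))) counter
termination_by l.length
decreasing_by
  · exact Nat.lt_succ_of_le (List.length_dropWhile_le _ _)
  · exact Nat.lt_succ_of_le (List.length_dropWhile_le _ _)

def return_mask_alt (trace_in : List Int) : List Int :=
  emitRuns (trace_in.filter keepB) 1

-- ===== PRECONDITION & SPEC =====
def Spec_return_mask (trace_in : List Int) (out : List Int) : Prop := out = return_mask_alt trace_in
instance (trace_in : List Int) (out : List Int) : Decidable (Spec_return_mask trace_in out) := by unfold Spec_return_mask; infer_instance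

-- ===== CLAIM (what is proved, stated in full; the proofs are below) =====
def Claim_equal_return_mask : Prop := ∀ (trace_in : List Int), Dom_return_mask trace_in → Spec_return_mask trace_in (return_mask trace_in)

-- ===== LEMMAS AND PROOFS =====

-- proof-only helper: B's output while inside a positive run currently labeled c
def emitCont (l : List Int) (c : Int) : List Int :=
  match l with
  | [] => []
  | y :: ys => if decide (y > 0) then c :: emitCont ys c else 0 :: emitRuns ys (c + 1)

theorem stepA_skip (s : Int × Bool × List Int) (x : Int) (h : keepB x = false) :
    stepA s x = s := by
  simp [keepB] at h
  have h1 : ¬ x = 0 := h.1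
  have h2 : ¬ 0 < x := by omega
  simp [stepA, h1, h2]

theorem foldl_filter_keep (l : List Int) :
    ∀ s : Int × Bool × List Int, (l.filter keepB).foldl stepA s = l.foldl stepA s := by
  induction l with
  | nil => intro s; rfl
  | cons x xs ih =>
    intro s
    by_cases h : keepB x = true
    · simp [h, ih]
    · simp at h
      simp [h, ih, stepA_skip s x h]

theorem emit_nonpos_cons (y : Int) (ys : List Int) (c : Int) (h : ¬ y > 0) :
    emitRuns (y :: ys) c = 0 :: emitRuns ys c := by
  rw [emitRuns, if_neg h]
  cases ys with
  | nil => simp [emitRuns]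
  | cons z zs =>
    by_cases hz : z > 0
    · simp [hz]
    · rw [emitRuns, if_neg hz]
      simp [hz, List.replicate_succ]

theorem emit_pos_cons (x : Int) (hx : x > 0) (l : List Int) :
    ∀ c : Int, emitRuns (x :: l) c = c :: emitCont l c := by
  induction l with
  | nil => intro c; rw [emitRuns, if_pos hx]; simp [emitCont, emitRuns]
  | cons y ys ih =>
    intro c
    by_cases hy : y > 0
    · have h2 := ih c
      rw [emitRuns, if_pos hx] at h2
      rw [emitRuns, if_pos hx]
      simp [hy, List.replicate_succ, emitCont]
      simpa [List.replicate_succ] using h2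
    · rw [emitRuns, if_pos hx]
      simp [hy, emitCont,
        emit_nonpos_cons y ys (c + 1) hy]

theorem main_invariant (l : List Int) (hl : ∀ x ∈ l, keepB x = true) :
    ∀ (c : Int) (m : List Int),
      ((l.foldl stepA (c, false, m)).2.2 = m ++ emitRuns l c) ∧
      ((l.foldl stepA (c, true, m)).2.2 = m ++ emitCont l c) := by
  induction l with
  | nil => intro c m; simp [emitRuns, emitCont]
  | cons x xs ih =>
    intro c m
    have hx : keepB x = true := hl x (by simp)
    have hxs : ∀ y ∈ xs, keepB y = true := fun y hy => hl y (by simp [hy])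
    have hcase : x = 0 ∨ x > 0 := by
      simp [keepB] at hx; omega
    constructor
    · -- in_group = false
      rcases hcase with h0 | hp
      · subst h0
        have hs : stepA (c, false, m) 0 = (c, false, m ++ [0]) := by simp [stepA]
        rw [List.foldl_cons, hs, (ih hxs c (m ++ [0])).1,
          emit_nonpos_cons 0 xs c (by omega)]
        simp
      · have hne : ¬ x = 0 := by omega
        have hs : stepA (c, false, m) x = (c, true, m ++ [c]) := by
          simp [stepA, hp, hne]
        rw [List.foldl_cons, hs, (ih hxs c (m ++ [c])).2, emit_pos_cons x hp xs c]
        simp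
    · -- in_group = true
      rcases hcase with h0 | hp
      · subst h0
        have hs : stepA (c, true, m) 0 = (c + 1, false, m ++ [0]) := by simp [stepA]
        rw [List.foldl_cons, hs, (ih hxs (c + 1) (m ++ [0])).1]
        simp [emitCont]
      · have hne : ¬ x = 0 := by omega
        have hs : stepA (c, true, m) x = (c, true, m ++ [c]) := by
          simp [stepA, hp, hne]
        rw [List.foldl_cons, hs, (ih hxs c (m ++ [c])).2]
        simp [emitCont, hp]

-- ===== VERDICT (by name: the statement is the Claim_ definition above) =====
theorem return_mask_spec : Claim_equal_return_mask := by
  intro l _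
  show return_mask l = return_mask_alt l
  unfold return_mask return_mask_alt
  rw [← foldl_filter_keep l (1, false, [])]
  have := (main_invariant (l.filter keepB) (fun x hx => List.of_mem_filter hx) 1 []).1
  simpa using this
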